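-- pv_equiv track=rewrite | github.com/MarcoCiammaichella/Tesi-magistrale-polimi | src/simmetria.py | simmetria_balconi_x
-- ===== SOURCE A (Python) =====
-- def simmetria_balconi_x(bbox,tolleranza):
--     if bbox.get("Balconies") is None:
--         return 0
--     left_bound=min(x[0] for x in bbox.get("Balconies"))
--     riga_max = max(bbox.get("Balconies"), key=lambda x: x[0])
--     right_bound=riga_max[0]+riga_max[2]
--     asse_simmetria_x=int((left_bound+right_bound)/2)
--     matches=0
--     balconi=[]
--     for bal in bbox.get("Balconies"):
--         if bal[0]<asse_simmetria_x and bal[0] + bal [2] > asse_simmetria_x: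
--             continue
--         balconi.append(bal)
--     balconi_sx = [(fx, fy,lar,lun) for (fx, fy,lar,lun) in balconi if fx < asse_simmetria_x]
--     for (fx,fy,lar,lun) in balconi_sx:
--         x_speculare= (asse_simmetria_x*2)-(fx+lar)
--         for (fx2,fy2,lar2,lun2) in balconi:
--             if abs(fx2 - x_speculare) <= tolleranza and abs(fy2 - fy) <= tolleranza:
--                 matches+=1
--     if matches==len(balconi_sx)and matches==len(balconi)-len(balconi_sx):
--         return(1)
--     return(0)
-- ===== SOURCE B (Python) =====
-- def _lb(ys, x):
--     # first index whose value is >= x (standard bisect_left loop)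
--     lo, hi = 0, len(ys)
--     while lo < hi:
--         m = (lo + hi) // 2
--         if ys[m] < x:
--             lo = m + 1
--         else:
--             hi = m
--     return lo
--
--
-- def _ub(ys, x):
--     # first index whose value is > x (standard bisect_right loop)
--     lo, hi = 0, len(ys)
--     while lo < hi:
--         m = (lo + hi) // 2
--         if x < ys[m]:
--             hi = m
--         else:
--             lo = m + 1
--     return lo
--
--
-- def simmetria_balconi_x(bbox, tolleranza):
--     bals = bbox.get("Balconies")
--     if bals is None:
--         return 0
--     lo = min(b[0] for b in bals)
--     hi = max(bals, key=lambda b: b[0])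
--     axis = int((lo + hi[0] + hi[2]) / 2)
--     kept = [b for b in bals if b[0] >= axis or b[0] + b[2] <= axis]
--     left = [b for b in kept if b[0] < axis]
--     # sort the kept balconies by fy once; for each left balcony only the
--     # fy-window [fy-tol, fy+tol], located by binary search, is scanned
--     srt = sorted(kept, key=lambda b: b[1])
--     ys = [b[1] for b in srt]
--     matches = 0
--     for (fx, fy, lar, lun) in left:
--         mirror = 2 * axis - fx - lar
--         for b2 in srt[_lb(ys, fy - tolleranza):_ub(ys, fy + tolleranza)]:
--             if abs(b2[0] - mirror) <= tolleranza:
--                 matches += 1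
--     return 1 if matches == len(left) == len(kept) - len(left) else 0
-- ===== Notes on version B (the rewrite author's own statement) =====
-- stated objective: alternative
-- what changed: B replaces A's scan of all kept balconies for every left balcony by sorting the kept balconies by fy once and, per left balcony, binary-searching (hand-written bisect) the fy-tolerance window and scanning only that window for the mirrored-fx match; it trades an unconditional sort for smaller inner scans.
-- outside the precondition, e.g. on simmetria_balconi_x({'Balconies': [[0, 0, 5, 1], [2, 0, 6], [10, 0, 5, 1]]}, 0): A returns 0, B returns 0
import Mathlib
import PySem

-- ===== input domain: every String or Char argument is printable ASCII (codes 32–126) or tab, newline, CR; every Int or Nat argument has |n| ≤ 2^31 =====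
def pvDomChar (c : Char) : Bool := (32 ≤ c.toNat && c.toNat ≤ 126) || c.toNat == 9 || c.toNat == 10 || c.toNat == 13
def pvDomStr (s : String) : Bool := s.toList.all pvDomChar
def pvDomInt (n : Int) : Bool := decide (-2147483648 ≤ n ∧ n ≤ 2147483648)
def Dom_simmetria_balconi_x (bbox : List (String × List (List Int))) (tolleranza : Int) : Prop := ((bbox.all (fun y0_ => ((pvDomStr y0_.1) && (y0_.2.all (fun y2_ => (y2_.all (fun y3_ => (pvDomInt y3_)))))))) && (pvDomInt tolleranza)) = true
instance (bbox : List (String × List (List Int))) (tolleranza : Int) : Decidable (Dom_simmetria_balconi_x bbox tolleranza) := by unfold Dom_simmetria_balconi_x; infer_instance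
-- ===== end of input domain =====

-- B replaces A's all-pairs matching by sorting the kept balconies by fy once and
-- binary-searching the fy-tolerance window for each left balcony (alternative algorithm,
-- not claimed faster). Equivalence of return values.

-- ===== PORT A =====
-- bal[i] on the 4-int rows admitted by Pre_ (pyGetD: exact under the in-range Pre_)
def pvGet (r : List Int) (i : Int) : Int := PySem.List.pyGetD r i 0

def simmetria_balconi_x (bbox : List (String × List (List Int))) (tolleranza : Int) : Int :=
  match List.lookup "Balconies" bbox with
  | none => 0
  | some bals =>
    let left_bound := (PySem.List.min? (bals.map (fun x => pvGet x 0)) (fun v => v)).getD 0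
    let riga_max := (PySem.List.max? bals (fun x => pvGet x 0)).getD []
    let right_bound := pvGet riga_max 0 + pvGet riga_max 2
    -- int((l+r)/2): exact float division then truncation for these bounded ints
    let asse := PySem.Int.truncdiv (left_bound + right_bound) 2
    let balconi := bals.foldl (fun acc bal =>
      if pvGet bal 0 < asse ∧ pvGet bal 0 + pvGet bal 2 > asse then acc else acc ++ [bal]) []
    let balconi_sx := balconi.filter (fun b => decide (pvGet b 0 < asse))
    let nmatch := balconi_sx.foldl (fun m b =>
      let x_speculare := asse * 2 - (pvGet b 0 + pvGet b 2)
      balconi.foldl (fun m2 b2 =>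
        if |pvGet b2 0 - x_speculare| ≤ tolleranza ∧ |pvGet b2 1 - pvGet b 1| ≤ tolleranza
        then m2 + 1 else m2) m) (0 : Int)
    if nmatch = (balconi_sx.length : Int) ∧
       nmatch = (balconi.length : Int) - (balconi_sx.length : Int) then 1 else 0

-- ===== PORT B =====
-- Source B's _lb/_ub are character-for-character the standard bisect_left/bisect_right loops
-- (while lo < hi: m = (lo+hi)//2; narrow), which is exactly PySem.List.bisectLeft/bisectRight.
def simmetria_balconi_x_alt (bbox : List (String × List (List Int))) (tolleranza : Int) : Int :=
  match List.lookup "Balconies" bbox with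
  | none => 0
  | some bals =>
    let lo := (PySem.List.min? (bals.map (fun b => pvGet b 0)) (fun v => v)).getD 0
    let hi := (PySem.List.max? bals (fun b => pvGet b 0)).getD []
    let axis := PySem.Int.truncdiv (lo + pvGet hi 0 + pvGet hi 2) 2
    let kept := bals.filter (fun b => decide (pvGet b 0 ≥ axis ∨ pvGet b 0 + pvGet b 2 ≤ axis))
    let left := kept.filter (fun b => decide (pvGet b 0 < axis))
    let srt := PySem.List.sorted kept (fun b => pvGet b 1)
    let ys := srt.map (fun b => pvGet b 1)
    let nmatch := left.foldl (fun (m : Int) b =>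
      let mirror := 2 * axis - pvGet b 0 - pvGet b 2
      (PySem.List.slice srt
          (some ((PySem.List.bisectLeft ys (pvGet b 1 - tolleranza) : Nat) : Int))
          (some ((PySem.List.bisectRight ys (pvGet b 1 + tolleranza) : Nat) : Int))).foldl
        (fun (m2 : Int) b2 => if |pvGet b2 0 - mirror| ≤ tolleranza then m2 + 1 else m2) m) (0 : Int)
    if nmatch = (left.length : Int) ∧ nmatch = (kept.length : Int) - (left.length : Int)
    then 1 else 0

-- ===== PRECONDITION & SPEC =====
-- Pre_ requires a non-empty "Balconies" list whose rows all have length 4: an empty list makes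
-- A's min() raise ValueError and a row of another length makes A's indexing/tuple unpacking
-- raise, except when such a row happens to straddle the axis and is merely skipped (excluded
-- although A returns there; see the cite).
def Pre_simmetria_balconi_x (bbox : List (String × List (List Int))) (tolleranza : Int) : Prop :=
  (match List.lookup "Balconies" bbox with
   | none => true
   | some l => !l.isEmpty && l.all (fun r => r.length == 4)) = true
instance (bbox : List (String × List (List Int))) (tolleranza : Int) : Decidable (Pre_simmetria_balconi_x bbox tolleranza) := by unfold Pre_simmetria_balconi_x; infer_instance

def pvWitness_simmetria_balconi_x : (List (String × List (List Int))) × Int :=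
  ([("Balconies", [[0, 0, 2, 3], [8, 0, 2, 3]])], 1)

def Spec_simmetria_balconi_x (bbox : List (String × List (List Int))) (tolleranza : Int) (out : Int) : Prop := out = simmetria_balconi_x_alt bbox tolleranza
instance (bbox : List (String × List (List Int))) (tolleranza : Int) (out : Int) : Decidable (Spec_simmetria_balconi_x bbox tolleranza out) := by unfold Spec_simmetria_balconi_x; infer_instance

-- ===== CLAIM (what is proved, stated in full; the proofs are below) =====
def Claim_equal_simmetria_balconi_x : Prop := ∀ (bbox : List (String × List (List Int))) (tolleranza : Int), Dom_simmetria_balconi_x bbox tolleranza → Pre_simmetria_balconi_x bbox tolleranza → Spec_simmetria_balconi_x bbox tolleranza (simmetria_balconi_x bbox tolleranza)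

-- ===== LEMMAS AND PROOFS =====

-- A's append-with-continue loop is the filter of the non-straddling balconies
lemma pv_skip_filter (p : List Int → Prop) [DecidablePred p] (l : List (List Int))
    (acc : List (List Int)) :
    l.foldl (fun acc x => if p x then acc else acc ++ [x]) acc
      = acc ++ l.filter (fun x => decide ¬ p x) := by
  induction l generalizing acc with
  | nil => simp
  | cons x t ih =>
    simp only [List.foldl_cons, List.filter_cons]
    by_cases h : p x
    · simp [h, ih]
    · simp [h, ih]

-- a count-if foldl is countP
lemma pv_foldl_count (p : List Int → Prop) [DecidablePred p] (l : List (List Int)) (m : Int) :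
    l.foldl (fun m2 b2 => if p b2 then m2 + 1 else m2) m
      = m + (l.countP (fun b2 => decide (p b2)) : Int) := by
  induction l generalizing m with
  | nil => simp
  | cons x t ih =>
    simp only [List.foldl_cons, List.countP_cons]
    by_cases h : p x
    · simp [h, ih]; ring
    · simp [h, ih]

-- the heart: for one left balcony, the bisected fy-window of the fy-sorted list counts exactly
-- the tolerance-box matches that A counts over the whole kept list
lemma pv_window (tol a : Int) (kept : List (List Int)) (b : List Int) :
    ((PySem.List.slice (PySem.List.sorted kept (fun r => pvGet r 1))
        (some ((PySem.List.bisectLeft ((PySem.List.sorted kept (fun r => pvGet r 1)).map (fun r => pvGet r 1)) (pvGet b 1 - tol) : Nat) : Int))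
        (some ((PySem.List.bisectRight ((PySem.List.sorted kept (fun r => pvGet r 1)).map (fun r => pvGet r 1)) (pvGet b 1 + tol) : Nat) : Int))).countP
      (fun b2 => decide (|pvGet b2 0 - (2 * a - pvGet b 0 - pvGet b 2)| ≤ tol)))
    = kept.countP (fun b2 => decide
        (|pvGet b2 0 - (a * 2 - (pvGet b 0 + pvGet b 2))| ≤ tol ∧ |pvGet b2 1 - pvGet b 1| ≤ tol)) := by
  set srt := PySem.List.sorted kept (fun r => pvGet r 1) with hsrt
  set ys := srt.map (fun r => pvGet r 1) with hys
  by_cases htol : tol < 0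
  · -- a negative tolerance satisfies no |·| ≤ tol: both counts are 0
    rw [List.countP_eq_zero.mpr, List.countP_eq_zero.mpr]
    · intro b2 _; simp only [decide_eq_true_eq, not_and]
      intro h; exfalso; have := abs_nonneg (pvGet b2 0 - (a * 2 - (pvGet b 0 + pvGet b 2))); omega
    · intro b2 _; simp only [decide_eq_true_eq]
      intro h; have := abs_nonneg (pvGet b2 0 - (2 * a - pvGet b 0 - pvGet b 2)); omega
  · replace htol : 0 ≤ tol := by omega
    have hpair : ys.Pairwise (· ≤ ·) := by
      rw [hys]; exact (List.pairwise_map).mpr (PySem.List.sorted_pairwise kept (fun r => pvGet r 1))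
    obtain ⟨hile, hlt_lb, hge_lb⟩ := PySem.List.bisectLeft_spec ys (pvGet b 1 - tol) hpair
    obtain ⟨hjle, hle_ub, hgt_ub⟩ := PySem.List.bisectRight_spec ys (pvGet b 1 + tol) hpair
    set i := PySem.List.bisectLeft ys (pvGet b 1 - tol) with hi
    set j := PySem.List.bisectRight ys (pvGet b 1 + tol) with hj
    have hlen : ys.length = srt.length := by rw [hys]; simp
    have hij : i ≤ j := by
      by_contra hc
      replace hc : j < i := by omega
      have hjlt : j < ys.length := lt_of_lt_of_le hc hile
      have h1 := hlt_lb j hjlt hc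
      have h2 := hgt_ub j hjlt (le_refl j)
      omega
    have hyget : ∀ (k : ℕ) (hk : k < srt.length), ys[k]'(by omega) = pvGet (srt[k]'hk) 1 := by
      intro k hk; simp [hys]
    -- the slice is drop-then-take
    rw [PySem.List.slice_natCast]
    -- count over kept = count over the sorted rearrangement
    rw [← List.Perm.countP_eq _ (PySem.List.sorted_perm kept (fun r => pvGet r 1) false), ← hsrt]
    -- split srt into the part before the window, the window, and the part after
    have hsplit : srt = srt.take i ++ ((srt.drop i).take (j - i) ++ srt.drop j) := by
      have : (srt.drop i).drop (j - i) = srt.drop j := by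
        rw [List.drop_drop]; congr 1; omega
      rw [← this, List.take_append_drop, List.take_append_drop]
    conv_rhs => rw [hsplit]
    rw [List.countP_append, List.countP_append]
    have hpre : (srt.take i).countP (fun b2 => decide
        (|pvGet b2 0 - (a * 2 - (pvGet b 0 + pvGet b 2))| ≤ tol ∧ |pvGet b2 1 - pvGet b 1| ≤ tol)) = 0 := by
      rw [List.countP_eq_zero]
      intro b2 hmem
      obtain ⟨k, hk, hkeq⟩ := List.mem_iff_getElem.mp hmem
      have hki : k < i := lt_of_lt_of_le hk (by simp)
      have hks : k < srt.length := lt_of_lt_of_le hk (by simp)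
      have := hlt_lb k (by omega) hki
      rw [hyget k hks] at this
      rw [List.getElem_take] at hkeq
      subst hkeq
      simp only [decide_eq_true_eq, not_and]
      intro _ habs
      rw [abs_le] at habs; omega
    have hpost : (srt.drop j).countP (fun b2 => decide
        (|pvGet b2 0 - (a * 2 - (pvGet b 0 + pvGet b 2))| ≤ tol ∧ |pvGet b2 1 - pvGet b 1| ≤ tol)) = 0 := by
      rw [List.countP_eq_zero]
      intro b2 hmem
      obtain ⟨k, hk, hkeq⟩ := List.mem_iff_getElem.mp hmem
      rw [List.getElem_drop] at hkeq
      have hks : j + k < srt.length := by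
        have := hk; rw [List.length_drop] at this; omega
      have := hgt_ub (j + k) (by omega) (by omega)
      rw [hyget (j + k) hks] at this
      subst hkeq
      simp only [decide_eq_true_eq, not_and]
      intro _ habs
      rw [abs_le] at habs; omega
    have hwin : ((srt.drop i).take (j - i)).countP (fun b2 => decide
          (|pvGet b2 0 - (a * 2 - (pvGet b 0 + pvGet b 2))| ≤ tol ∧ |pvGet b2 1 - pvGet b 1| ≤ tol))
        = ((srt.drop i).take (j - i)).countP (fun b2 => decide
          (|pvGet b2 0 - (2 * a - pvGet b 0 - pvGet b 2)| ≤ tol)) := by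
      apply List.countP_congr
      intro b2 hmem
      obtain ⟨k, hk, hkeq⟩ := List.mem_iff_getElem.mp hmem
      have hkji : k < j - i := lt_of_lt_of_le hk (by simp)
      have hks : i + k < srt.length := by
        have h1 : k < (srt.drop i).length := lt_of_lt_of_le hk (by simp)
        rw [List.length_drop] at h1; omega
      rw [List.getElem_take, List.getElem_drop] at hkeq
      have hge := hge_lb (i + k) (by omega) (by omega)
      have hle := hle_ub (i + k) (by omega) (by omega)
      rw [hyget (i + k) hks] at hge hle
      subst hkeq
      simp only [decide_eq_true_eq]
      constructor
      · rintro ⟨h1, _⟩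
        rw [abs_le] at h1 ⊢; omega
      · intro h1
        refine ⟨by rw [abs_le] at h1 ⊢; omega, ?_⟩
        rw [abs_le]; omega
    rw [hpre, hpost, hwin]
    omega

-- A's tail (everything after the axis is fixed), parameterised by the axis
def pvA_tail (tol a : Int) (bals : List (List Int)) : Int :=
  let balconi := bals.foldl (fun acc bal =>
    if pvGet bal 0 < a ∧ pvGet bal 0 + pvGet bal 2 > a then acc else acc ++ [bal]) []
  let balconi_sx := balconi.filter (fun b => decide (pvGet b 0 < a))
  let nmatch := balconi_sx.foldl (fun m b =>
    let x_speculare := a * 2 - (pvGet b 0 + pvGet b 2)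
    balconi.foldl (fun m2 b2 =>
      if |pvGet b2 0 - x_speculare| ≤ tol ∧ |pvGet b2 1 - pvGet b 1| ≤ tol
      then m2 + 1 else m2) m) (0 : Int)
  if nmatch = (balconi_sx.length : Int) ∧
     nmatch = (balconi.length : Int) - (balconi_sx.length : Int) then 1 else 0

-- B's tail, parameterised by the same axis
def pvB_tail (tol a : Int) (bals : List (List Int)) : Int :=
  let kept := bals.filter (fun b => decide (pvGet b 0 ≥ a ∨ pvGet b 0 + pvGet b 2 ≤ a))
  let left := kept.filter (fun b => decide (pvGet b 0 < a))
  let srt := PySem.List.sorted kept (fun b => pvGet b 1)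
  let ys := srt.map (fun b => pvGet b 1)
  let nmatch := left.foldl (fun (m : Int) b =>
    let mirror := 2 * a - pvGet b 0 - pvGet b 2
    (PySem.List.slice srt
        (some ((PySem.List.bisectLeft ys (pvGet b 1 - tol) : Nat) : Int))
        (some ((PySem.List.bisectRight ys (pvGet b 1 + tol) : Nat) : Int))).foldl
      (fun (m2 : Int) b2 => if |pvGet b2 0 - mirror| ≤ tol then m2 + 1 else m2) m) (0 : Int)
  if nmatch = (left.length : Int) ∧ nmatch = (kept.length : Int) - (left.length : Int)
  then 1 else 0

lemma pv_tail (tol a : Int) (bals : List (List Int)) :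
    pvA_tail tol a bals = pvB_tail tol a bals := by
  unfold pvA_tail pvB_tail
  dsimp only
  rw [pv_skip_filter (fun bal => pvGet bal 0 < a ∧ pvGet bal 0 + pvGet bal 2 > a) bals []]
  rw [List.nil_append]
  rw [show bals.filter (fun x => decide ¬(pvGet x 0 < a ∧ pvGet x 0 + pvGet x 2 > a))
        = bals.filter (fun r => decide (pvGet r 0 ≥ a ∨ pvGet r 0 + pvGet r 2 ≤ a)) from
    List.filter_congr (fun x _ => by simp only [decide_eq_decide]; omega)]
  set kept := bals.filter (fun r => decide (pvGet r 0 ≥ a ∨ pvGet r 0 + pvGet r 2 ≤ a)) with hkept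
  set left := kept.filter (fun b => decide (pvGet b 0 < a)) with hleft
  -- both accumulations add, per left balcony, the same count
  have hfold : ∀ (l : List (List Int)) (m : Int),
      l.foldl (fun m b => kept.foldl (fun m2 b2 =>
        if |pvGet b2 0 - (a * 2 - (pvGet b 0 + pvGet b 2))| ≤ tol ∧ |pvGet b2 1 - pvGet b 1| ≤ tol
        then m2 + 1 else m2) m) m
      = l.foldl (fun m b =>
        (PySem.List.slice (PySem.List.sorted kept (fun r => pvGet r 1))
            (some ((PySem.List.bisectLeft ((PySem.List.sorted kept (fun r => pvGet r 1)).map (fun r => pvGet r 1)) (pvGet b 1 - tol) : Nat) : Int))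
            (some ((PySem.List.bisectRight ((PySem.List.sorted kept (fun r => pvGet r 1)).map (fun r => pvGet r 1)) (pvGet b 1 + tol) : Nat) : Int))).foldl
          (fun m2 b2 => if |pvGet b2 0 - (2 * a - pvGet b 0 - pvGet b 2)| ≤ tol then m2 + 1 else m2) m) m := by
    intro l
    induction l with
    | nil => intro m; rfl
    | cons b t ih =>
      intro m
      simp only [List.foldl_cons]
      rw [pv_foldl_count (fun b2 =>
            |pvGet b2 0 - (a * 2 - (pvGet b 0 + pvGet b 2))| ≤ tol ∧ |pvGet b2 1 - pvGet b 1| ≤ tol) kept m,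
          pv_foldl_count (fun b2 => |pvGet b2 0 - (2 * a - pvGet b 0 - pvGet b 2)| ≤ tol) _ m,
          pv_window tol a kept b, ih]
  rw [hfold left 0]

-- ===== VERDICT (by name: the statement is the Claim_ definition above) =====
theorem simmetria_balconi_x_spec : Claim_equal_simmetria_balconi_x := by
  intro bbox tol _ _
  unfold Spec_simmetria_balconi_x
  unfold simmetria_balconi_x simmetria_balconi_x_alt
  cases h : List.lookup "Balconies" bbox with
  | none => rfl
  | some bals =>
    dsimp only
    rw [show ∀ x y z : Int, x + (y + z) = x + y + z from fun x y z => by ring]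
    exact pv_tail tol _ bals
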